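-- pv_equiv track=rewrite | github.com/AlexandreGirold/huffman | Huffman/alexandre.girold_huffman.py | from_binary
-- ===== SOURCE A (Python) =====
-- def __ascii_to_binary (data):
--     """
--         Encodes a ascii character into its binary representation. On 8 bits.
--     """
--     binary = ""
--     for i in range(8):
--         binary = str(data % 2) + binary
--         data = data // 2
--     return binary
--
-- def from_binary(dataIN, align):
--     """
--     Retrieve a string containing binary code from its real binary value (inverse of :func:`toBinary`).
--     """
--     l = len(dataIN)
--     data = ""
--     for i in range(l):
--         if i == l - 1:  # ignore the align first zeros
--             temp = __ascii_to_binary(ord(dataIN[i]))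
--             for j in range(align, 8):
--                 data += temp[j]
--         else:
--             data += __ascii_to_binary(ord(dataIN[i]))
--
--     return data
-- ===== SOURCE B (Python) =====
-- def from_binary(dataIN, align):
--     n = len(dataIN)
--     if n == 0:
--         return ""
--     keep = 8 - align if align < 8 else 0
--     num = int.from_bytes(bytes(ord(c) & 0xFF for c in dataIN[:-1]), "big")
--     num = (num << keep) + ((ord(dataIN[-1]) & 0xFF) % (1 << keep))
--     total = 8 * (n - 1) + keep
--     if total == 0:
--         return ""
--     return format(num, "0%db" % total)
-- ===== Notes on version B (the rewrite author's own statement) =====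
-- stated objective: faster
-- what changed: B never builds per-character 8-bit strings: it packs the whole input into one big base-256 integer (int.from_bytes, with the last byte's kept bits appended via a shift and a modulus instead of A's inner copying loop) and renders that single integer once with a zero-padded binary format.
-- outside the precondition, e.g. on from_binary('A', -1): A returns '101000001', B returns '001000001'; on from_binary('A', -9): A raises IndexError, B returns '00000000001000001'
import Mathlib
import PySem

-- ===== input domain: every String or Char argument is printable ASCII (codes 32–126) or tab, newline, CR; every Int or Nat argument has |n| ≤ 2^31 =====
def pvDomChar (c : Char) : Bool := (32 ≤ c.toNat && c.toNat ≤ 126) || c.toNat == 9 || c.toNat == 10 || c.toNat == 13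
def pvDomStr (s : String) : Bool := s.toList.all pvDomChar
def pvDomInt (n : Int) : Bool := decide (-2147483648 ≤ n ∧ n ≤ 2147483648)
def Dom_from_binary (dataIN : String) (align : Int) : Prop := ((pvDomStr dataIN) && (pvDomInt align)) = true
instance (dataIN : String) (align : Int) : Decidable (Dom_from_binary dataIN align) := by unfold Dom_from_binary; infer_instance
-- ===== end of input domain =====

-- B replaces A's per-character 8-bit string building by packing the input into one base-256
-- big integer (the last byte's kept bits appended via shift and modulus) rendered with a single
-- zero-padded binary format (objective: faster, C-level bulk conversion instead of per-char loops).

-- ===== PORT A =====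
-- helper __ascii_to_binary: binary = str(data % 2) + binary; data = data // 2, 8 times
def pvAsciiToBinary (data : Int) : List Char :=
  ((PySem.List.pyRange 0 8 1).foldl
    (fun (st : List Char × Int) _ =>
      (PySem.Int.toChars (PySem.Int.mod st.2 2) ++ st.1, PySem.Int.floordiv st.2 2))
    ([], data)).1

def from_binary (dataIN : String) (align : Int) : String :=
  let cs := dataIN.toList
  let l : Int := (cs.length : Int)
  let data := (PySem.List.pyRange 0 l 1).foldl
    (fun (acc : List Char) i =>
      if i = l - 1 then
        let temp := pvAsciiToBinary ((PySem.List.pyGetD cs i ' ').toNat : Int)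
        -- 'data += temp[j]': pyGet? = none is Python's IndexError (outside Pre_); no char is appended there
        (PySem.List.pyRange align 8 1).foldl
          (fun acc2 j => acc2 ++ ((PySem.List.pyGet? temp j).elim [] (fun ch => [ch]))) acc
      else
        acc ++ pvAsciiToBinary ((PySem.List.pyGetD cs i ' ').toNat : Int))
    []
  String.ofList data

-- ===== PORT B =====
-- Source B: pack the input into one base-256 big integer and format it once as a zero-padded
-- binary string. int.from_bytes(..., 'big') is the base-256 left fold; dataIN[:-1] is
-- List.dropLast, dataIN[-1] is getLastD (the n == 0 case returned already); Python's
-- nonnegative ints are Nat. format(num, '0<total>b') is exact here because num < 2^total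
-- by construction (each masked byte is < 256, the last contribution < 2^keep).
def from_binary_alt (dataIN : String) (align : Int) : String :=
  let cs := dataIN.toList
  if cs.length = 0 then "" else
  let keep : Nat := (if align < 8 then 8 - align else 0).toNat
  let num0 : Nat := cs.dropLast.foldl (fun acc c => acc * 256 + (c.toNat &&& 255)) 0
  let num : Nat := (num0 <<< keep) + (((cs.getLastD ' ').toNat &&& 255) % (1 <<< keep))
  let total : Nat := 8 * (cs.length - 1) + keep
  if total = 0 then "" else
  String.ofList ((List.range total).map
    (fun k => if num / 2 ^ (total - 1 - k) % 2 = 1 then '1' else '0'))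

-- ===== PRECONDITION & SPEC =====
-- Pre_ excludes negative align on nonempty input: there A raises IndexError (align < -8) or
-- returns an accidental wraparound of the last byte caused by its negative range indices
-- (-8 ≤ align < 0), a corner no caller of this alignment parameter would specify.
def Pre_from_binary (dataIN : String) (align : Int) : Prop :=
  dataIN.toList = [] ∨ 0 ≤ align
instance (dataIN : String) (align : Int) : Decidable (Pre_from_binary dataIN align) := by
  unfold Pre_from_binary; infer_instance

def pvWitness_from_binary : String × Int := ("A", 3)

def Spec_from_binary (dataIN : String) (align : Int) (out : String) : Prop :=
  out = from_binary_alt dataIN align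
instance (dataIN : String) (align : Int) (out : String) : Decidable (Spec_from_binary dataIN align out) := by
  unfold Spec_from_binary; infer_instance

-- ===== CLAIM (what is proved, stated in full; the proofs are below) =====
def Claim_equal_from_binary : Prop := ∀ (dataIN : String) (align : Int),
  Dom_from_binary dataIN align → Pre_from_binary dataIN align →
  Spec_from_binary dataIN align (from_binary dataIN align)

-- ===== LEMMAS AND PROOFS =====

-- the bit of num at position k, as the character '0' or '1'
def bitChar (num k : Nat) : Char := if num / 2 ^ k % 2 = 1 then '1' else '0'

-- the low t bits of num, most significant first
def padBits (num t : Nat) : List Char :=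
  (List.range t).map (fun k => bitChar num (t - 1 - k))

lemma length_padBits (num t : Nat) : (padBits num t).length = t := by simp [padBits]

lemma padBits_succ (num t : Nat) : padBits num (t + 1) = bitChar num t :: padBits num t := by
  unfold padBits
  rw [List.range_succ_eq_map, List.map_cons, List.map_map]
  simp only [Function.comp_def, Nat.add_sub_cancel, Nat.sub_zero, List.cons.injEq]
  refine ⟨trivial, List.map_congr_left ?_⟩
  intro a _
  congr 1
  omega

-- A's byte helper equals the padded 8-bit string, for the character codes Dom admits
lemma ascii_eq_pad8 : ∀ n : Nat, n < 128 → pvAsciiToBinary (n : Int) = padBits (n &&& 255) 8 := by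
  decide

-- A's main fold characterization on a nonempty list (as in the inner-loop lemma below)
lemma inner_loop_eq_drop (temp : List Char) (htemp : temp.length = 8) (align : Int)
    (hal : 0 ≤ align) (acc : List Char) :
    (PySem.List.pyRange align 8 1).foldl
      (fun acc2 j => acc2 ++ ((PySem.List.pyGet? temp j).elim [] (fun ch => [ch]))) acc
    = acc ++ temp.drop align.toNat := by
  by_cases h8 : 8 ≤ align
  · rw [PySem.List.pyRange_one_eq_nil h8, List.drop_of_length_le (by omega)]
    simp
  · have hcongr : ∀ (acc2 : List Char), ∀ j ∈ PySem.List.pyRange align 8 1,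
        acc2 ++ ((PySem.List.pyGet? temp j).elim [] (fun ch => [ch]))
        = acc2 ++ [PySem.List.pyGetD temp j ' '] := by
      intro acc2 j hj
      rw [PySem.List.mem_pyRange_one] at hj
      have h0 : 0 ≤ j := le_trans hal hj.1
      have hjn : j.toNat < temp.length := by omega
      have hget : PySem.List.pyGet? temp j = temp[j.toNat]? := by
        conv_lhs => rw [show j = (j.toNat : Int) by omega]
        exact PySem.List.pyGet?_natCast temp j.toNat
      have hgd : PySem.List.pyGetD temp j ' ' = temp[j.toNat]'hjn :=
        PySem.List.pyGetD_eq_getElem temp ' ' h0 (by omega)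
      rw [hget, List.getElem?_eq_getElem hjn, hgd]
      simp
    rw [PySem.List.foldl_congr_mem _ _ _ _ hcongr]
    have hlen : (8 : Int) = PySem.List.len temp := by simp [htemp]
    rw [hlen, PySem.List.foldl_pyRange_pyGetD temp ' ' (fun acc2 ch => acc2 ++ [ch]) acc hal,
      PySem.List.foldl_append_singleton]

lemma A_core (cs : List Char) (hne : cs ≠ []) (align : Int) (hal : 0 ≤ align)
    (hdom : ∀ c ∈ cs, c.toNat < 128) :
    (PySem.List.pyRange 0 (cs.length : Int) 1).foldl
      (fun (acc : List Char) i =>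
        if i = (cs.length : Int) - 1 then
          (PySem.List.pyRange align 8 1).foldl
            (fun acc2 j => acc2 ++ ((PySem.List.pyGet? (pvAsciiToBinary ((PySem.List.pyGetD cs i ' ').toNat : Int)) j).elim [] (fun ch => [ch]))) acc
        else
          acc ++ pvAsciiToBinary ((PySem.List.pyGetD cs i ' ').toNat : Int))
      []
    = cs.dropLast.flatMap (fun c => padBits (c.toNat &&& 255) 8) ++
      (padBits ((cs.getLast hne).toNat &&& 255) 8).drop align.toNat := by
  have hl : 1 ≤ cs.length := List.length_pos_of_ne_nil hne
  have hsp : PySem.List.pyRange 0 (cs.length : Int) 1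
      = PySem.List.pyRange 0 ((cs.length : Int) - 1) 1 ++ [(cs.length : Int) - 1] := by
    have h := PySem.List.pyRange_one_succ_right (a := 0) (b := (cs.length : Int) - 1) (by omega)
    rw [show (cs.length : Int) - 1 + 1 = (cs.length : Int) by ring] at h
    exact h
  rw [hsp, List.foldl_append]
  have hcongr : ∀ (acc : List Char), ∀ i ∈ PySem.List.pyRange 0 ((cs.length : Int) - 1) 1,
      (if i = (cs.length : Int) - 1 then
          (PySem.List.pyRange align 8 1).foldl
            (fun acc2 j => acc2 ++ ((PySem.List.pyGet? (pvAsciiToBinary ((PySem.List.pyGetD cs i ' ').toNat : Int)) j).elim [] (fun ch => [ch]))) acc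
        else
          acc ++ pvAsciiToBinary ((PySem.List.pyGetD cs i ' ').toNat : Int))
      = acc ++ padBits ((PySem.List.pyGetD cs.dropLast i ' ').toNat &&& 255) 8 := by
    intro acc i hi
    rw [PySem.List.mem_pyRange_one] at hi
    rw [if_neg (by omega)]
    have h1 : i.toNat < cs.dropLast.length := by
      rw [List.length_dropLast]; omega
    have h1' : i.toNat < cs.length := by omega
    have hgd : PySem.List.pyGetD cs i ' ' = cs[i.toNat]'h1' :=
      PySem.List.pyGetD_eq_getElem cs ' ' hi.1 (by omega)
    have hgd' : PySem.List.pyGetD cs.dropLast i ' ' = cs.dropLast[i.toNat]'h1 :=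
      PySem.List.pyGetD_eq_getElem cs.dropLast ' ' hi.1 (by omega)
    have helem : cs.dropLast[i.toNat]'h1 = cs[i.toNat]'h1' := List.getElem_dropLast h1
    rw [hgd, hgd', helem, ascii_eq_pad8 _ (hdom _ (List.getElem_mem h1'))]
  rw [PySem.List.foldl_congr_mem _ _ _ _ hcongr]
  have hgl : PySem.List.pyGetD cs ((cs.length : Int) - 1) ' ' = cs.getLast hne := by
    rw [PySem.List.pyGetD_eq_getElem cs ' ' (by omega) (by omega)]
    rw [List.getLast_eq_getElem]
    congr 1
    omega
  simp only [List.foldl_cons, List.foldl_nil, if_true]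
  rw [hgl, ascii_eq_pad8 _ (hdom _ (List.getLast_mem hne)),
    inner_loop_eq_drop _ (length_padBits _ _) align hal]
  congr 1
  have hlen1 : ((cs.length : Int) - 1) = PySem.List.len cs.dropLast := by
    simp [List.length_dropLast]; omega
  rw [hlen1]
  have h0 := PySem.List.foldl_pyRange_pyGetD cs.dropLast ' '
      (fun (acc : List Char) c => acc ++ padBits (c.toNat &&& 255) 8) ([] : List Char) (le_refl 0)
  simp only [Int.toNat_zero, List.drop_zero] at h0
  rw [h0, PySem.List.foldl_append_eq_flatMap, List.nil_append]

lemma bitChar_mod (num t k : Nat) (hk : k < t) : bitChar (num % 2 ^ t) k = bitChar num k := by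
  have h : (num % 2 ^ t).testBit k = num.testBit k := by
    rw [Nat.testBit_mod_two_pow]; simp [hk]
  rw [Nat.testBit_eq_decide_div_mod_eq, Nat.testBit_eq_decide_div_mod_eq] at h
  simp only [decide_eq_decide] at h
  unfold bitChar
  simp only [h]

lemma padBits_mod (num t : Nat) : padBits (num % 2 ^ t) t = padBits num t := by
  unfold padBits
  apply List.map_congr_left
  intro k hk
  rw [List.mem_range] at hk
  exact bitChar_mod num t (t - 1 - k) (by omega)

lemma padBits_split (a b n m : Nat) (hb : b < 2 ^ m) :
    padBits (a * 2 ^ m + b) (n + m) = padBits a n ++ padBits b m := by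
  induction n with
  | zero =>
    have hmod : (a * 2 ^ m + b) % 2 ^ m = b := by
      rw [mul_comm a (2 ^ m), Nat.mul_add_mod, Nat.mod_eq_of_lt hb]
    rw [Nat.zero_add, ← padBits_mod (a * 2 ^ m + b) m, hmod]
    simp [padBits]
  | succ n ih =>
    have hdm : (a * 2 ^ m + b) / 2 ^ m = a := by
      rw [mul_comm a (2 ^ m), Nat.mul_add_div (Nat.two_pow_pos m), Nat.div_eq_of_lt hb,
        Nat.add_zero]
    have h1 : (a * 2 ^ m + b) / 2 ^ (n + m) = a / 2 ^ n := by
      rw [show n + m = m + n by omega, pow_add, ← Nat.div_div_eq_div_mul, hdm]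
    have htop : bitChar (a * 2 ^ m + b) (n + m) = bitChar a n := by
      unfold bitChar
      rw [h1]
    rw [show n + 1 + m = (n + m) + 1 by omega, padBits_succ, padBits_succ, htop, ih]
    simp

lemma drop_padBits (m t d : Nat) (hd : d ≤ t) :
    (padBits m t).drop d = padBits (m % 2 ^ (t - d)) (t - d) := by
  obtain ⟨s, rfl⟩ : ∃ s, t = d + s := ⟨t - d, by omega⟩
  rw [Nat.add_sub_cancel_left]
  have hq : m / 2 ^ s * 2 ^ s + m % 2 ^ s = m := Nat.div_add_mod' m _
  have h := padBits_split (m / 2 ^ s) (m % 2 ^ s) d s (Nat.mod_lt _ (Nat.two_pow_pos s))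
  rw [hq] at h
  rw [h]
  exact List.drop_left' (length_padBits _ _)

lemma foldl_byte_pad (cs : List Char) :
    padBits (cs.foldl (fun acc c => acc * 256 + (c.toNat &&& 255)) 0) (8 * cs.length)
    = cs.flatMap (fun c => padBits (c.toNat &&& 255) 8) := by
  induction cs using List.reverseRecOn with
  | nil => simp [padBits]
  | append_singleton cs c ih =>
    rw [show (256 : Nat) = 2 ^ 8 by norm_num] at ih ⊢
    rw [List.foldl_append, List.foldl_cons, List.foldl_nil, List.flatMap_append,
      List.length_append, List.length_singleton,
      show 8 * (cs.length + 1) = 8 * cs.length + 8 by ring]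
    have hv : c.toNat &&& 255 < 2 ^ 8 := by
      have := Nat.and_le_right (n := c.toNat) (m := 255)
      norm_num
      omega
    rw [padBits_split _ _ _ _ hv, ih]
    simp

lemma B_eq (dataIN : String) (align : Int) (hne : dataIN.toList ≠ []) (hal : 0 ≤ align) :
    from_binary_alt dataIN align
    = String.ofList (dataIN.toList.dropLast.flatMap (fun c => padBits (c.toNat &&& 255) 8) ++
        (padBits ((dataIN.toList.getLast hne).toNat &&& 255) 8).drop align.toNat) := by
  unfold from_binary_alt
  dsimp only
  rw [if_neg (by simpa using (List.length_pos_of_ne_nil hne).ne')]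
  set keep : Nat := (if align < 8 then 8 - align else 0).toNat with hkeep
  set v : Nat := (dataIN.toList.getLastD ' ').toNat &&& 255 with hv
  have hvl : v = (dataIN.toList.getLast hne).toNat &&& 255 := by
    rw [hv, List.getLastD_eq_getLast?, List.getLast?_eq_some_getLast hne, Option.getD_some]
  have hlen : dataIN.toList.length - 1 = dataIN.toList.dropLast.length := by
    simp
  have hkey : padBits ((dataIN.toList.dropLast.foldl
        (fun acc c => acc * 256 + (c.toNat &&& 255)) 0) <<< keep + v % (1 <<< keep))
        (8 * (dataIN.toList.length - 1) + keep)
      = dataIN.toList.dropLast.flatMap (fun c => padBits (c.toNat &&& 255) 8) ++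
        (padBits ((dataIN.toList.getLast hne).toNat &&& 255) 8).drop align.toNat := by
    rw [Nat.shiftLeft_eq, Nat.one_shiftLeft]
    rw [hlen, padBits_split _ _ _ _ (Nat.mod_lt _ (Nat.two_pow_pos _)),
      foldl_byte_pad, hvl]
    congr 1
    by_cases h8 : align < 8
    · have hk : keep = 8 - align.toNat := by rw [hkeep, if_pos h8]; omega
      have hd : align.toNat ≤ 8 := by omega
      rw [drop_padBits _ _ _ hd, hk]
    · have hk : keep = 0 := by rw [hkeep, if_neg h8]; simp
      rw [hk, List.drop_of_length_le (by rw [length_padBits]; omega)]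
      simp [padBits]
  by_cases htot : 8 * (dataIN.toList.length - 1) + keep = 0
  · rw [if_pos htot]
    rw [htot] at hkey
    have : padBits ((dataIN.toList.dropLast.foldl
        (fun acc c => acc * 256 + (c.toNat &&& 255)) 0) <<< keep + v % (1 <<< keep)) 0
        = [] := by simp [padBits]
    rw [this] at hkey
    rw [← hkey]
  · rw [if_neg htot, ← hkey]
    rfl

theorem from_binary_spec : Claim_equal_from_binary := by
  intro dataIN align hdom hpre
  unfold Spec_from_binary from_binary
  by_cases hnil : dataIN.toList = []
  · rw [hnil]
    unfold from_binary_alt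
    rw [hnil]
    simp [PySem.List.pyRange_one_eq_nil (by norm_num : (0:Int) ≤ 0)]
  · have hal : 0 ≤ align := hpre.resolve_left hnil
    have hchars : ∀ c ∈ dataIN.toList, c.toNat < 128 := by
      unfold Dom_from_binary at hdom
      simp only [Bool.and_eq_true, pvDomStr, List.all_eq_true, pvDomChar] at hdom
      intro c hc
      have h := hdom.1 c hc
      simp only [Bool.or_eq_true, Bool.and_eq_true, decide_eq_true_eq, beq_iff_eq] at h
      omega
    simp only []
    rw [A_core dataIN.toList hnil align hal hchars, B_eq dataIN align hnil hal]
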